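-- pv_equiv track=rewrite | github.com/zenzenzencoding/basic_python | final_test/ResultB/10141540122/10141540122-徐鑫妍-编程.py | drawPoint
-- ===== SOURCE A (Python) =====
-- def drawPoint(start,end):
--     s=''
--     for i in range(0,end+1):
--         if i==start or i==end:
--             s=s+'*'
--         else:
--             s+=''
--     return s
-- ===== SOURCE B (Python) =====
-- def drawPoint(start, end):
--     # Closed form: the loop over range(0, end+1) appends one '*' at i == end
--     # (always in range when end >= 0) and one more at i == start when start
--     # lies in [0, end) — no scan needed.
--     if end < 0:
--         return ''
--     return '**' if 0 <= start < end else '*'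
-- ===== Notes on version B (the rewrite author's own statement) =====
-- stated objective: faster
-- what changed: Replaced the character-by-character loop over range(0, end+1) with an O(1) closed form: one star for the always-matching index end (when end >= 0) plus one more when start lies in [0, end).
import Mathlib
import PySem

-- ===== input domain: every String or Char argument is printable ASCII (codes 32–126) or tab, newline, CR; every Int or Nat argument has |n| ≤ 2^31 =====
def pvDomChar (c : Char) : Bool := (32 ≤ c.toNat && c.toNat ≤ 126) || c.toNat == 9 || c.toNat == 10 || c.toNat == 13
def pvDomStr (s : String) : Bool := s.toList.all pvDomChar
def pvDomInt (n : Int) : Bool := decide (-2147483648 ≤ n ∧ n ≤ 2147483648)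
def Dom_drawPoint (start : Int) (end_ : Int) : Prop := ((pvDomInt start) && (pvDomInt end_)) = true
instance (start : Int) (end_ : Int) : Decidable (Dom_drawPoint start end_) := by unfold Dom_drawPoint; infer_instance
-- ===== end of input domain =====

-- ===== PORT A =====
-- B replaces A's per-index scan by an O(1) closed form (same return value; measured speed in a timing run).
def drawPoint (start : Int) (end_ : Int) : String :=
  (PySem.List.pyRange 0 (end_ + 1) 1).foldl
    (fun s i => if i == start || i == end_ then s ++ "*" else s ++ "") ""

-- ===== PORT B =====
def drawPoint_alt (start : Int) (end_ : Int) : String :=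
  if end_ < 0 then "" else if 0 ≤ start ∧ start < end_ then "**" else "*"

-- ===== PRECONDITION & SPEC =====
def Spec_drawPoint (start : Int) (end_ : Int) (out : String) : Prop := out = drawPoint_alt start end_
instance (start : Int) (end_ : Int) (out : String) : Decidable (Spec_drawPoint start end_ out) := by unfold Spec_drawPoint; infer_instance

-- ===== CLAIM (what is proved, stated in full; the proofs are below) =====
def Claim_equal_drawPoint : Prop := ∀ (start : Int) (end_ : Int), Dom_drawPoint start end_ → Spec_drawPoint start end_ (drawPoint start end_)

-- ===== LEMMAS AND PROOFS =====

-- Folding A's loop body over a list with no matching index leaves the accumulator unchanged.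
theorem drawPoint_fold_const (start end_ : Int) (l : List Int)
    (h : ∀ x ∈ l, ¬(x = start ∨ x = end_)) (init : String) :
    l.foldl (fun s i => if i == start || i == end_ then s ++ "*" else s ++ "") init = init := by
  induction l generalizing init with
  | nil => rfl
  | cons x xs ih =>
    have hx := h x (List.mem_cons_self ..)
    have h1 : (x == start) = false := decide_eq_false (fun hc => hx (Or.inl hc))
    have h2 : (x == end_) = false := decide_eq_false (fun hc => hx (Or.inr hc))
    have hstep : (if (x == start || x == end_) = true then init ++ "*" else init ++ "")
        = init := by
      simp only [h1, h2, Bool.or_self, Bool.false_eq_true, if_false]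
      exact String.append_empty
    rw [List.foldl_cons, hstep]
    exact ih (fun x hm => h x (List.mem_cons_of_mem _ hm)) init

-- The prefix fold over range(0, end_) contributes exactly the star for start (when 0 ≤ start < end_).
theorem drawPoint_prefix (start end_ : Int) :
    (PySem.List.pyRange 0 end_ 1).foldl
      (fun s i => if i == start || i == end_ then s ++ "*" else s ++ "") ""
    = if 0 ≤ start ∧ start < end_ then "*" else "" := by
  by_cases hs : 0 ≤ start ∧ start < end_
  · rw [if_pos hs,
      PySem.List.pyRange_one_append 0 start end_ hs.1 (le_of_lt hs.2),
      PySem.List.pyRange_one_cons hs.2, List.foldl_append]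
    rw [drawPoint_fold_const start end_ _
        (by intro x hx
            rw [PySem.List.mem_pyRange_one] at hx
            omega) ""]
    simp only [List.foldl_cons, beq_self_eq_true, Bool.true_or, if_pos]
    rw [drawPoint_fold_const start end_ _
        (by intro x hx
            rw [PySem.List.mem_pyRange_one] at hx
            omega)]
    rfl
  · rw [if_neg hs]
    exact drawPoint_fold_const start end_ _
      (by intro x hx
          rw [PySem.List.mem_pyRange_one] at hx
          omega) ""

-- ===== VERDICT (by name: the statement is the Claim_ definition above) =====
theorem drawPoint_spec : Claim_equal_drawPoint := by
  intro start end_ _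
  unfold Spec_drawPoint drawPoint drawPoint_alt
  by_cases he : end_ < 0
  · rw [if_pos he, PySem.List.pyRange_one_eq_nil (by omega)]
    rfl
  · rw [if_neg he, PySem.List.pyRange_one_succ_right (by omega), List.foldl_append,
      drawPoint_prefix start end_]
    simp only [List.foldl_cons, List.foldl_nil, beq_self_eq_true, Bool.or_true, if_pos]
    by_cases hs : 0 ≤ start ∧ start < end_
    · rw [if_pos hs, if_pos hs]
      rfl
    · rw [if_neg hs, if_neg hs]
      rfl
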